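-- pv_equiv track=rewrite | github.com/GreshamLab/supirfactor-dynamical | supirfactor_dynamical/datasets/anndata_backed_dataset.py | _batched_n
-- ===== SOURCE A (Python) =====
-- import math
--
-- def _batched_n(things, n_batches):
--
--     n = len(things)
--     batch_length = math.floor(n / n_batches)
--     extra = n - batch_length * n_batches
--
--     _start = 0
--     for i in range(n_batches):
--         if i < extra:
--             _end = min(_start + batch_length + 1, n)
--         else:
--             _end = min(_start + batch_length, n)
--         yield things[_start:_end]
--         _start = _end
-- ===== SOURCE B (Python) =====
-- import math
--
-- def _batched_n(things, n_batches):
--     n = len(things)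
--     batch_length = math.floor(n / n_batches)
--     extra = n - batch_length * n_batches
--     for i in range(n_batches):
--         start = i * batch_length + min(i, extra)
--         end = (i + 1) * batch_length + min(i + 1, extra)
--         yield things[start:end]
-- ===== Notes on version B (the rewrite author's own statement) =====
-- stated objective: simpler
-- what changed: Each batch's bounds are computed by a closed-form per-index formula (start = i*batch_length + min(i, extra)) instead of threading a running _start accumulator through an if/else with a clamp.
-- outside the precondition, e.g. on _batched_n([1, 2, 3], 0): A raises ZeroDivisionError, B raises ZeroDivisionError
import Mathlib
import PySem

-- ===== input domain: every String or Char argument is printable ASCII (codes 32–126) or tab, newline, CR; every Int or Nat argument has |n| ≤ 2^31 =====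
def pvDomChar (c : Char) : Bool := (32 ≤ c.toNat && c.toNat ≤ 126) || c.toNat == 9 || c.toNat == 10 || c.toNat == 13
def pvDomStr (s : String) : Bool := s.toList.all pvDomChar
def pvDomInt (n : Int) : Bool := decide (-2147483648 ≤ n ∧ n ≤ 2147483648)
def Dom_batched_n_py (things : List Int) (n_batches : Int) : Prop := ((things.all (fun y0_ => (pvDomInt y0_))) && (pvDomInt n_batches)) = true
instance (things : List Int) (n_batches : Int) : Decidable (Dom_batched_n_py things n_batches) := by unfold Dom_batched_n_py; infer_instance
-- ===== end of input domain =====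

-- B replaces A's running _start accumulator and if/else+clamp with a closed-form
-- per-index slice-bound formula (same values, 'simpler' objective).

-- ===== PORT A =====
-- A threads a running _start through the loop; each step picks the batch end with
-- an if/else and a min-clamp against n.  math.floor(n / n_batches) on these ints
-- equals floor division (exact: n is a list length, far below float precision loss).
def batched_n_py (things : List Int) (n_batches : Int) : List (List Int) :=
  let n : Int := things.length
  let batch_length := PySem.Int.floordiv n n_batches
  let extra := n - batch_length * n_batches
  ((PySem.List.pyRange 0 n_batches 1).foldl
    (fun (st : List (List Int) × Int) i =>
      let e := if i < extra then min (st.2 + batch_length + 1) n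
               else min (st.2 + batch_length) n
      (st.1 ++ [PySem.List.slice things (some st.2) (some e)], e))
    ([], 0)).1

-- ===== PORT B =====
def batched_n_py_alt (things : List Int) (n_batches : Int) : List (List Int) :=
  let n : Int := things.length
  let batch_length := PySem.Int.floordiv n n_batches
  let extra := n - batch_length * n_batches
  (PySem.List.pyRange 0 n_batches 1).map
    (fun i => PySem.List.slice things
        (some (i * batch_length + min i extra))
        (some ((i + 1) * batch_length + min (i + 1) extra)))

-- ===== PRECONDITION & SPEC =====
-- Python A raises ZeroDivisionError when n_batches == 0 (so does B); excluded.
def Pre_batched_n_py (things : List Int) (n_batches : Int) : Prop := n_batches ≠ 0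
instance (things : List Int) (n_batches : Int) : Decidable (Pre_batched_n_py things n_batches) := by unfold Pre_batched_n_py; infer_instance
def pvWitness_batched_n_py : List Int × Int := ([1, 2, 3, 4, 5], 2)

def Spec_batched_n_py (things : List Int) (n_batches : Int) (out : List (List Int)) : Prop := out = batched_n_py_alt things n_batches
instance (things : List Int) (n_batches : Int) (out : List (List Int)) : Decidable (Spec_batched_n_py things n_batches out) := by unfold Spec_batched_n_py; infer_instance

-- ===== CLAIM (what is proved, stated in full; the proofs are below) =====
def Claim_equal_batched_n_py : Prop := ∀ (things : List Int) (n_batches : Int), Dom_batched_n_py things n_batches → Pre_batched_n_py things n_batches → Spec_batched_n_py things n_batches (batched_n_py things n_batches)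

-- ===== LEMMAS AND PROOFS =====

-- Loop invariant: starting A's fold at index a with accumulator start a*bl + min a e
-- produces exactly B's closed-form slices for indices a..k-1.
lemma batched_fold_eq (things : List Int) (n bl e k : Int)
    (hbl : 0 ≤ bl) (he : 0 ≤ e) (hek : e ≤ k) (hn : n = bl * k + e) :
    ∀ (a : Int), 0 ≤ a → a ≤ k → ∀ (acc : List (List Int)),
    ((PySem.List.pyRange a k 1).foldl
      (fun (st : List (List Int) × Int) i =>
        let en := if i < e then min (st.2 + bl + 1) n else min (st.2 + bl) n
        (st.1 ++ [PySem.List.slice things (some st.2) (some en)], en))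
      (acc, a * bl + min a e)).1
    = acc ++ (PySem.List.pyRange a k 1).map
        (fun i => PySem.List.slice things (some (i * bl + min i e))
            (some ((i + 1) * bl + min (i + 1) e))) := by
  intro a
  induction' hfuel : (k - a).toNat using Nat.strong_induction_on with fuel ih generalizing a
  intro ha hak acc
  by_cases hlt : a < k
  · rw [PySem.List.pyRange_one_cons hlt]
    simp only [List.foldl_cons, List.map_cons]
    have hmul : (a + 1) * bl ≤ k * bl := mul_le_mul_of_nonneg_right (by omega) hbl
    have hen : (if a < e then min (a * bl + min a e + bl + 1) n
        else min (a * bl + min a e + bl) n) = (a + 1) * bl + min (a + 1) e := by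
      by_cases hae : a < e
      · rw [if_pos hae, min_eq_left hae.le, min_eq_left (show a + 1 ≤ e by omega),
          min_eq_left (show a * bl + a + bl + 1 ≤ n by nlinarith)]
        ring
      · rw [if_neg hae, min_eq_right (show e ≤ a by omega), min_eq_right (show e ≤ a + 1 by omega),
          min_eq_left (show a * bl + e + bl ≤ n by nlinarith)]
        ring
    simp only [hen]
    rw [ih (k - (a + 1)).toNat (by omega) (a + 1) (by omega) (by omega) (by omega)]
    simp
  · rw [PySem.List.pyRange_one_eq_nil (by omega)]
    simp

-- ===== VERDICT (by name: the statement is the Claim_ definition above) =====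
theorem batched_n_py_spec : Claim_equal_batched_n_py := by
  intro things k _ hk
  unfold Spec_batched_n_py batched_n_py batched_n_py_alt
  simp only []
  set n : Int := (things.length : Int) with hn
  by_cases hkpos : 0 < k
  · set bl := PySem.Int.floordiv n k with hbl
    have hb := (PySem.Int.floordiv_eq_iff_of_pos hkpos).mp hbl.symm
    have hbl0 : 0 ≤ bl := by
      by_contra h
      have h1 : bl + 1 ≤ 0 := by omega
      have : (bl + 1) * k ≤ 0 := mul_nonpos_of_nonpos_of_nonneg h1 (by omega)
      have hn0 : (0 : Int) ≤ n := by positivity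
      omega
    have he0 : 0 ≤ n - bl * k := by
      have := hb.1; omega
    have hek : n - bl * k ≤ k := by
      have := hb.2
      have : n < bl * k + k := by nlinarith [hb.2]
      omega
    have h := batched_fold_eq things n bl (n - bl * k) k hbl0 he0 hek (by ring)
      0 le_rfl (by omega) []
    rw [show (0 : Int) * bl + min 0 (n - bl * k) = 0 by omega] at h
    simpa using h
  · rw [PySem.List.pyRange_one_eq_nil (by omega)]
    simp
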